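-- pv_equiv track=rewrite | github.com/ItzikEzra-rh/UnifAI | prompt_lab/src/prompt_lab/storage/datahandler/huggingface_data_handler.py | _dict_list_to_columns
-- ===== SOURCE A (Python) =====
-- from typing import Any, Dict, Iterator, List
--
-- def _dict_list_to_columns(records: List[Dict[str, Any]]) -> Dict[str, List[Any]]:
--     """
--     Convert a list of dicts into a column-oriented dict for building a Hugging Face Dataset.
--     """
--     if not records:
--         return {}
--     all_keys = set()
--     for r in records:
--         all_keys.update(r.keys())
--
--     return {
--         k: [r.get(k) for r in records]
--         for k in sorted(all_keys)
--     }
-- ===== SOURCE B (Python) =====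
-- def _dict_list_to_columns(records):
--     """
--     Convert a list of dicts into a column-oriented dict, built incrementally
--     in one streaming pass: new columns are back-filled with None, and after
--     each record every column missing from it is padded with None.
--     """
--     columns = {}
--     i = 0
--     for r in records:
--         for k, v in r.items():
--             columns.setdefault(k, [None] * i).append(v)
--         i += 1
--         for vs in columns.values():
--             if len(vs) < i:
--                 vs.append(None)
--     return {k: columns[k] for k in sorted(columns)}
-- ===== Notes on version B (the rewrite author's own statement) =====
-- stated objective: alternative
-- what changed: Instead of first collecting the full key set and then scanning all records once per key, B builds the columns in a single streaming pass over the records, back-filling a newly seen column with None and padding columns absent from the current record, then emits the columns in sorted key order.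
import Mathlib
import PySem

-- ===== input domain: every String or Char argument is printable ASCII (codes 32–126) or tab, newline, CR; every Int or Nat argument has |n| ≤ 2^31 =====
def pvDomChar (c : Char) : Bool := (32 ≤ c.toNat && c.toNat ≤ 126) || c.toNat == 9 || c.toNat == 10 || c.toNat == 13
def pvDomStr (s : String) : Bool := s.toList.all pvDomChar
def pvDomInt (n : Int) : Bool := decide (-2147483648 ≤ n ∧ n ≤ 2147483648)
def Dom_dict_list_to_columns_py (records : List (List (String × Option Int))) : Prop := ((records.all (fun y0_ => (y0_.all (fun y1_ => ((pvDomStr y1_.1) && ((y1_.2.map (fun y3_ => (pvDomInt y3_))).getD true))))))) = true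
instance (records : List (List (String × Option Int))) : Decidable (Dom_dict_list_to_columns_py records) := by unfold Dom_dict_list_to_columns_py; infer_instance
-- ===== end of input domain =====

-- B builds the columns in one streaming pass over the records (back-filling and
-- padding with None) instead of collecting the key set and scanning all records
-- per key; objective: an alternative algorithm of similar cost.

-- ===== PORT A =====
def dict_list_to_columns_py (records : List (List (String × Option Int))) : List (String × List (Option Int)) :=
  if records = [] then []
  else
    let allKeys : PySem.Set String :=
      records.foldl (fun s r => PySem.Set.update s (PySem.Dict.ofList r).keys) []
    (PySem.List.sorted allKeys (fun k => k) false).map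
      (fun k => (k, records.map (fun r => (PySem.Dict.ofList r).getD k none)))

-- ===== PORT B =====
-- pad step: 'if len(vs) < i: vs.append(None)' over columns.values()
def pvPad (i : Nat) (p : String × List (Option Int)) : String × List (Option Int) :=
  if p.2.length < i + 1 then (p.1, p.2 ++ [none]) else p

-- body of B's outer loop: process one record, then pad every short column
def pvAddRecord (st : PySem.Dict String (List (Option Int)) × Nat)
    (r : List (String × Option Int)) : PySem.Dict String (List (Option Int)) × Nat :=
  let cols := (PySem.Dict.ofList r).items.foldl
    (fun c kv => (c.setdefault kv.1 (List.replicate st.2 none)).modify kv.1 [] (· ++ [kv.2])) st.1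
  (PySem.Dict.mk (cols.items.map (pvPad st.2)), st.2 + 1)

def dict_list_to_columns_py_alt (records : List (List (String × Option Int))) : List (String × List (Option Int)) :=
  let st := records.foldl pvAddRecord (PySem.Dict.empty, 0)
  (PySem.List.sorted st.1.keys (fun k => k) false).map (fun k => (k, st.1.getD k []))

-- ===== PRECONDITION & SPEC =====
def Spec_dict_list_to_columns_py (records : List (List (String × Option Int))) (out : List (String × List (Option Int))) : Prop := out = dict_list_to_columns_py_alt records
instance (records : List (List (String × Option Int))) (out : List (String × List (Option Int))) : Decidable (Spec_dict_list_to_columns_py records out) := by unfold Spec_dict_list_to_columns_py; infer_instance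

-- ===== CLAIM (what is proved, stated in full; the proofs are below) =====
def Claim_equal_dict_list_to_columns_py : Prop := ∀ (records : List (List (String × Option Int))), Dom_dict_list_to_columns_py records → Spec_dict_list_to_columns_py records (dict_list_to_columns_py records)

-- ===== LEMMAS AND PROOFS =====

-- A's value of r.get(k) for a record r
def pvRget (r : List (String × Option Int)) (k : String) : Option Int :=
  (PySem.Dict.ofList r).getD k none

-- A's all_keys over a prefix of the records
def pvKeysOf (pre : List (List (String × Option Int))) : PySem.Set String :=
  pre.foldl (fun s r => PySem.Set.update s (PySem.Dict.ofList r).keys) []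

theorem pvKeysOf_append (pre : List (List (String × Option Int))) (r : List (String × Option Int)) :
    pvKeysOf (pre ++ [r]) = PySem.Set.update (pvKeysOf pre) (PySem.Dict.ofList r).keys := by
  simp [pvKeysOf, List.foldl_append]

theorem mem_pvKeysOf (pre : List (List (String × Option Int))) (k : String) :
    k ∈ pvKeysOf pre ↔ ∃ r ∈ pre, k ∈ (PySem.Dict.ofList r).keys := by
  induction pre using List.reverseRecOn with
  | nil => simp [pvKeysOf]
  | append_singleton pre r ih =>
    rw [pvKeysOf_append, PySem.Set.mem_update]
    simp only [List.mem_append, List.mem_singleton, ih]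
    aesop

theorem pvRget_eq_none (r : List (String × Option Int)) (k : String)
    (h : k ∉ (PySem.Dict.ofList r).keys) : pvRget r k = none := by
  apply PySem.Dict.getD_of_not_contains
  rw [← Bool.not_eq_true, PySem.Dict.contains_iff_mem_keys]
  exact h

-- the inner loop over one record: lookup in the result
theorem pvInner_get? (l : List (String × Option Int)) (i : Nat)
    (cols : PySem.Dict String (List (Option Int)))
    (hnd : (l.map Prod.fst).Nodup) (k : String) :
    (l.foldl (fun c kv => (c.setdefault kv.1 (List.replicate i none)).modify kv.1 [] (· ++ [kv.2])) cols).get? k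
    = match (PySem.Dict.mk l).get? k with
      | some v => some ((cols.get? k).getD (List.replicate i none) ++ [v])
      | none => cols.get? k := by
  induction l generalizing cols with
  | nil => rfl
  | cons p t ih =>
    obtain ⟨a, w⟩ := p
    simp only [List.map_cons, List.nodup_cons] at hnd
    rw [List.foldl_cons, ih _ hnd.2, PySem.Dict.get?_mk_cons]
    by_cases hak : a = k
    · subst hak
      have ht : (PySem.Dict.mk t).get? a = none := by
        rw [PySem.Dict.get?_eq_none_iff_not_mem_keys]
        exact hnd.1
      rw [ht]
      simp only [beq_self_eq_true, if_true]
      show ((cols.setdefault a (List.replicate i none)).insert a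
        ((cols.setdefault a (List.replicate i none)).getD a [] ++ [w])).get? a = _
      rw [PySem.Dict.get?_insert, PySem.Dict.getD_setdefault_self,
        PySem.Dict.getD_eq_get?_getD]
      simp
    · have hbeq : (a == k) = false := by simp [hak]
      rw [hbeq]
      simp only [Bool.false_eq_true, if_false]
      have hc : ((cols.setdefault a (List.replicate i none)).modify a [] (· ++ [w])).get? k
          = cols.get? k := by
        show ((cols.setdefault a (List.replicate i none)).insert a _).get? k = _
        rw [PySem.Dict.get?_insert, if_neg (fun h => hak h.symm),
          PySem.Dict.get?_setdefault_of_ne _ _ (fun h => hak h.symm)]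
      rw [hc]

-- the inner loop over one record: keys of the result
theorem pvInner_keys (l : List (String × Option Int)) (i : Nat)
    (cols : PySem.Dict String (List (Option Int))) :
    (l.foldl (fun c kv => (c.setdefault kv.1 (List.replicate i none)).modify kv.1 [] (· ++ [kv.2])) cols).keys
    = PySem.Set.update cols.keys (l.map Prod.fst) := by
  induction l generalizing cols with
  | nil => rfl
  | cons p t ih =>
    obtain ⟨a, w⟩ := p
    rw [List.foldl_cons, ih, List.map_cons, PySem.Set.update_cons]
    congr 1
    rw [PySem.Dict.keys_modify]
    have hcontains : ((cols.setdefault a (List.replicate i none)).contains a) = true := by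
      rw [PySem.Dict.contains_setdefault]; simp
    rw [PySem.Dict.keys_insert_of_contains _ _ hcontains, PySem.Dict.keys_setdefault]
    show _ = if (cols.keys).contains a = true then cols.keys else cols.keys ++ [a]
    by_cases hm : a ∈ cols.keys
    · rw [if_pos ((PySem.Dict.contains_iff_mem_keys _ _).mpr hm),
        if_pos (by simpa using hm)]
    · rw [if_neg (by rw [PySem.Dict.contains_iff_mem_keys]; exact hm),
        if_neg (by simpa using hm)]

-- the padding pass: lookup in the result
theorem pvPad_get? (l : List (String × List (Option Int))) (i : Nat) (k : String) :
    (PySem.Dict.mk (l.map (pvPad i))).get? k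
    = ((PySem.Dict.mk l).get? k).map (fun vs => if vs.length < i + 1 then vs ++ [none] else vs) := by
  induction l with
  | nil => rfl
  | cons p t ih =>
    have hfst : (pvPad i p).1 = p.1 := by unfold pvPad; split <;> rfl
    have hsnd : (pvPad i p).2 = if p.2.length < i + 1 then p.2 ++ [none] else p.2 := by
      unfold pvPad; split <;> simp_all
    rw [List.map_cons, show (pvPad i p :: t.map (pvPad i)) = ((pvPad i p).1, (pvPad i p).2) :: t.map (pvPad i) from rfl,
      PySem.Dict.get?_mk_cons, hfst, hsnd,
      show (p :: t) = (p.1, p.2) :: t from rfl, PySem.Dict.get?_mk_cons]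
    by_cases h : p.1 == k
    · rw [if_pos h, if_pos h]; rfl
    · rw [if_neg (by simp_all), if_neg (by simp_all)]; exact ih

-- the padding pass: keys of the result
theorem pvPad_keys (l : List (String × List (Option Int))) (i : Nat) :
    (PySem.Dict.mk (l.map (pvPad i))).keys = (PySem.Dict.mk l).keys := by
  show (l.map (pvPad i)).map Prod.fst = l.map Prod.fst
  rw [List.map_map]
  apply List.map_congr_left
  intro p _
  show (pvPad i p).1 = p.1
  unfold pvPad; split <;> rfl

-- main invariant of B's streaming fold
theorem pvFold_inv (pre : List (List (String × Option Int))) :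
    (pre.foldl pvAddRecord (PySem.Dict.empty, 0)).2 = pre.length ∧
    (pre.foldl pvAddRecord (PySem.Dict.empty, 0)).1.keys = pvKeysOf pre ∧
    ∀ k, (pre.foldl pvAddRecord (PySem.Dict.empty, 0)).1.get? k =
      if k ∈ pvKeysOf pre then some (pre.map (fun r => pvRget r k)) else none := by
  induction pre using List.reverseRecOn with
  | nil =>
    refine ⟨rfl, rfl, fun k => ?_⟩
    simp [pvKeysOf]
  | append_singleton pre r ih =>
    obtain ⟨ih1, ih2, ih3⟩ := ih
    rw [List.foldl_append]
    set st := pre.foldl pvAddRecord (PySem.Dict.empty, 0) with hst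
    have hnd : ((PySem.Dict.ofList r).items.map Prod.fst).Nodup :=
      PySem.Dict.nodup_keys_ofList r
    refine ⟨by simp [pvAddRecord, ih1], ?_, ?_⟩
    · show (PySem.Dict.mk _).keys = _
      rw [pvPad_keys,
        show PySem.Dict.mk ((PySem.Dict.ofList r).items.foldl _ st.1).items
          = (PySem.Dict.ofList r).items.foldl _ st.1 from rfl,
        pvInner_keys, ih2, pvKeysOf_append]
      rfl
    · intro k
      show (PySem.Dict.mk _).get? k = _
      rw [pvPad_get?,
        show PySem.Dict.mk ((PySem.Dict.ofList r).items.foldl _ st.1).items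
          = (PySem.Dict.ofList r).items.foldl _ st.1 from rfl,
        pvInner_get? _ _ _ hnd,
        show PySem.Dict.mk (PySem.Dict.ofList r).items = PySem.Dict.ofList r from rfl]
      have hmem : k ∈ pvKeysOf (pre ++ [r]) ↔ k ∈ pvKeysOf pre ∨ k ∈ (PySem.Dict.ofList r).keys := by
        rw [pvKeysOf_append, PySem.Set.mem_update]
      by_cases hkr : k ∈ (PySem.Dict.ofList r).keys
      · obtain ⟨v, hv⟩ : ∃ v, (PySem.Dict.ofList r).get? k = some v := by
          rcases h : (PySem.Dict.ofList r).get? k with _ | v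
          · exact absurd ((PySem.Dict.get?_eq_none_iff_not_mem_keys _ _).mp h hkr) (fun x => x)
          · exact ⟨v, rfl⟩
        have hvr : pvRget r k = v := by
          rw [pvRget, PySem.Dict.getD_eq_get?_getD, hv]; rfl
        rw [hv, ih3 k, if_pos (hmem.mpr (Or.inr hkr))]
        by_cases hkp : k ∈ pvKeysOf pre
        · rw [if_pos hkp]
          simp only [Option.getD_some, Option.map_some]
          have hlen : (pre.map (fun r => pvRget r k) ++ [v]).length = st.2 + 1 := by
            simp [ih1]
          rw [if_neg (by rw [hlen]; omega)]
          simp [hvr]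
        · rw [if_neg hkp]
          simp only [Option.getD_none, Option.map_some]
          have hrep : List.replicate st.2 none = pre.map (fun r => pvRget r k) := by
            symm
            rw [List.eq_replicate_iff]
            constructor
            · simp [ih1]
            · intro b hb
              rw [List.mem_map] at hb
              obtain ⟨r', hr', hb⟩ := hb
              rw [← hb]
              apply pvRget_eq_none
              intro hk'
              exact hkp ((mem_pvKeysOf pre k).mpr ⟨r', hr', hk'⟩)
          have hlen : (List.replicate st.2 none ++ [v] : List (Option Int)).length = st.2 + 1 := by
            simp
          rw [if_neg (by rw [hlen]; omega), hrep]
          simp [hvr]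
      · have hr0 : (PySem.Dict.ofList r).get? k = none :=
          (PySem.Dict.get?_eq_none_iff_not_mem_keys _ _).mpr hkr
        rw [hr0, ih3 k]
        by_cases hkp : k ∈ pvKeysOf pre
        · rw [if_pos hkp, if_pos (hmem.mpr (Or.inl hkp))]
          simp only [Option.map_some]
          have hlen : (pre.map (fun r => pvRget r k)).length = st.2 := by simp [ih1]
          rw [if_pos (by rw [hlen]; omega)]
          have : pvRget r k = none := pvRget_eq_none r k hkr
          simp [this]
        · rw [if_neg hkp, if_neg (fun h => (hmem.mp h).elim hkp hkr)]
          rfl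

-- ===== VERDICT (by name: the statement is the Claim_ definition above) =====
theorem dict_list_to_columns_py_spec : Claim_equal_dict_list_to_columns_py := by
  unfold Claim_equal_dict_list_to_columns_py
  intro records _
  unfold Spec_dict_list_to_columns_py
  obtain ⟨_, h2, h3⟩ := pvFold_inv records
  unfold dict_list_to_columns_py dict_list_to_columns_py_alt
  by_cases hnil : records = []
  · subst hnil; rfl
  · rw [if_neg hnil]
    rw [show (records.foldl (fun s r => PySem.Set.update s (PySem.Dict.ofList r).keys)
      ([] : PySem.Set String)) = pvKeysOf records from rfl, ← h2]
    apply List.map_congr_left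
    intro k hk
    rw [PySem.List.mem_sorted] at hk
    rw [h2] at hk
    have := h3 k
    rw [if_pos hk] at this
    rw [PySem.Dict.getD_eq_get?_getD, this]
    simp [pvRget]
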